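-- pv_equiv track=rewrite | github.com/AiGentsy/aigentsy-ame-runtime | audio_engine.py | _fallback_script
-- ===== SOURCE A (Python) =====
-- def _fallback_script(audio_type: str, description: str, duration: int) -> str:
--     """Fallback script when AI generation fails"""
--
--     target_words = duration * 150
--
--     fallback_scripts = {
--         'voiceover': f"Welcome to this presentation about {description}. [PAUSE] In the next {duration} minutes, we'll explore the key concepts and benefits. [PAUSE] This information will help you understand and implement these ideas effectively. Thank you for your attention.",
--
--         'podcast': f"Welcome to today's episode! [PAUSE] Today we're discussing {description}. This is an important topic that affects many people. [PAUSE] Let's dive into the details and explore what this means for you.",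
--
--         'audiobook': f"Chapter One. [PAUSE] Our story begins with {description}. [SLOW] This sets the foundation for everything that follows. [NORMAL] As we explore this topic, you'll discover new insights and perspectives.",
--
--         'training': f"Welcome to this training session on {description}. [PAUSE] By the end of this {duration}-minute session, you'll have a clear understanding of the key concepts and practical applications.",
--
--         'meditation': f"Welcome to this {duration}-minute meditation. [PAUSE] Find a comfortable position and close your eyes. [BREATHE] Let's begin by focusing on {description}. [PAUSE] Breathe naturally and let yourself relax."
--     }
--
--     base_script = fallback_scripts.get(audio_type, fallback_scripts['voiceover'])
--
--     # Extend script to meet word count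
--     while len(base_script.split()) < target_words:
--         base_script += f" [PAUSE] This gives you time to reflect on {description} and how it applies to your situation."
--
--     return base_script[:target_words * 6]  # Approximate character limit
-- ===== SOURCE B (Python) =====
-- def _base_script(audio_type: str, description: str, duration: int) -> str:
--     if audio_type == 'podcast':
--         return f"Welcome to today's episode! [PAUSE] Today we're discussing {description}. This is an important topic that affects many people. [PAUSE] Let's dive into the details and explore what this means for you."
--     if audio_type == 'audiobook':
--         return f"Chapter One. [PAUSE] Our story begins with {description}. [SLOW] This sets the foundation for everything that follows. [NORMAL] As we explore this topic, you'll discover new insights and perspectives."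
--     if audio_type == 'training':
--         return f"Welcome to this training session on {description}. [PAUSE] By the end of this {duration}-minute session, you'll have a clear understanding of the key concepts and practical applications."
--     if audio_type == 'meditation':
--         return f"Welcome to this {duration}-minute meditation. [PAUSE] Find a comfortable position and close your eyes. [BREATHE] Let's begin by focusing on {description}. [PAUSE] Breathe naturally and let yourself relax."
--     return f"Welcome to this presentation about {description}. [PAUSE] In the next {duration} minutes, we'll explore the key concepts and benefits. [PAUSE] This information will help you understand and implement these ideas effectively. Thank you for your attention."
--
--
-- def _fallback_script(audio_type: str, description: str, duration: int) -> str: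
--     target_words = duration * 150
--     base = _base_script(audio_type, description, duration)
--     suffix = f" [PAUSE] This gives you time to reflect on {description} and how it applies to your situation."
--     # the suffix starts with a space, so each copy adds exactly len(suffix.split()) words
--     wb = len(base.split())
--     ws = len(suffix.split())
--     k = max(0, -((wb - target_words) // ws))  # ceil((target_words - wb) / ws), clamped at 0
--     return (base + suffix * k)[:target_words * 6]
-- ===== Notes on version B (the rewrite author's own statement) =====
-- stated objective: faster
-- what changed: Replaces A's quadratic while-loop (re-splitting the growing script each iteration) with an arithmetic ceiling-division repeat count, one string multiplication and one concatenation; the dict lookup becomes an if/elif chain.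
import Mathlib
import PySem

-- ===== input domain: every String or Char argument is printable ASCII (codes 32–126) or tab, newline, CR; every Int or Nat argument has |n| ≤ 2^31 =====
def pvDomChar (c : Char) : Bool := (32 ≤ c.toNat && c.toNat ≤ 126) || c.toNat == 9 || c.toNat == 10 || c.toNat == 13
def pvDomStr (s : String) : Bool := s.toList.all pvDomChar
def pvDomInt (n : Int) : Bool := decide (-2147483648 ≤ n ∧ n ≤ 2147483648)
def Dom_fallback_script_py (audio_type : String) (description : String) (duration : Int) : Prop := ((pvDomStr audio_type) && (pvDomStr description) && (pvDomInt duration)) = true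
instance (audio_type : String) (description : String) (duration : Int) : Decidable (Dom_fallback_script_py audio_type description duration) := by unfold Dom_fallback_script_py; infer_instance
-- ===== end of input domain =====

-- B replaces A's quadratic pad-until-long-enough loop by an arithmetic repeat count (faster; asymptotic).

-- shared template data (the five f-string script templates and the padding suffix, as functions of
-- the interpolated description/duration strings; pure data used by both ports)
def pvVoiceover (ds ns : List Char) : List Char :=
  "Welcome to this presentation about ".toList ++ ds ++ ". [PAUSE] In the next ".toList ++ ns ++ " minutes, we'll explore the key concepts and benefits. [PAUSE] This information will help you understand and implement these ideas effectively. Thank you for your attention.".toList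
def pvPodcast (ds : List Char) : List Char :=
  "Welcome to today's episode! [PAUSE] Today we're discussing ".toList ++ ds ++ ". This is an important topic that affects many people. [PAUSE] Let's dive into the details and explore what this means for you.".toList
def pvAudiobook (ds : List Char) : List Char :=
  "Chapter One. [PAUSE] Our story begins with ".toList ++ ds ++ ". [SLOW] This sets the foundation for everything that follows. [NORMAL] As we explore this topic, you'll discover new insights and perspectives.".toList
def pvTraining (ds ns : List Char) : List Char :=
  "Welcome to this training session on ".toList ++ ds ++ ". [PAUSE] By the end of this ".toList ++ ns ++ "-minute session, you'll have a clear understanding of the key concepts and practical applications.".toList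
def pvMeditation (ds ns : List Char) : List Char :=
  "Welcome to this ".toList ++ ns ++ "-minute meditation. [PAUSE] Find a comfortable position and close your eyes. [BREATHE] Let's begin by focusing on ".toList ++ ds ++ ". [PAUSE] Breathe naturally and let yourself relax.".toList
def pvSuffix (ds : List Char) : List Char :=
  " [PAUSE] This gives you time to reflect on ".toList ++ ds ++ " and how it applies to your situation.".toList

-- ===== PORT A =====
-- A's while loop; fuel target.toNat is enough: each appended suffix adds at least one word
def pvLoopA (suffix : List Char) (target : Int) : Nat → List Char → List Char
  | 0, s => s
  | f + 1, s =>
    if ((PySem.Chars.split₀ s).length : Int) < target then pvLoopA suffix target f (s ++ suffix) else s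

def fallback_script_py (audio_type : String) (description : String) (duration : Int) : String :=
  let target : Int := duration * 150
  let ds := description.toList
  let ns := PySem.Int.toChars duration
  let scripts : PySem.Dict String (List Char) := PySem.Dict.ofList
    [("voiceover", pvVoiceover ds ns), ("podcast", pvPodcast ds), ("audiobook", pvAudiobook ds),
     ("training", pvTraining ds ns), ("meditation", pvMeditation ds ns)]
  let base := scripts.getD audio_type ((scripts.get? "voiceover").getD [])
  let final := pvLoopA (pvSuffix ds) target target.toNat base
  String.ofList (PySem.List.slice final none (some (target * 6)))

-- ===== PORT B =====
def pvBaseB (audio_type : String) (ds ns : List Char) : List Char :=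
  if audio_type = "podcast" then pvPodcast ds
  else if audio_type = "audiobook" then pvAudiobook ds
  else if audio_type = "training" then pvTraining ds ns
  else if audio_type = "meditation" then pvMeditation ds ns
  else pvVoiceover ds ns

def fallback_script_py_alt (audio_type : String) (description : String) (duration : Int) : String :=
  let target : Int := duration * 150
  let ds := description.toList
  let base := pvBaseB audio_type ds (PySem.Int.toChars duration)
  let suffix := pvSuffix ds
  let wb : Int := (PySem.Chars.split₀ base).length
  let ws : Int := (PySem.Chars.split₀ suffix).length
  let k : Int := max 0 (-(PySem.Int.floordiv (wb - target) ws))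
  String.ofList (PySem.List.slice (base ++ (List.replicate k.toNat suffix).flatten) none (some (target * 6)))

-- ===== PRECONDITION & SPEC =====
def Spec_fallback_script_py (audio_type : String) (description : String) (duration : Int) (out : String) : Prop := out = fallback_script_py_alt audio_type description duration
instance (audio_type : String) (description : String) (duration : Int) (out : String) : Decidable (Spec_fallback_script_py audio_type description duration out) := by unfold Spec_fallback_script_py; infer_instance

-- ===== CLAIM (what is proved, stated in full; the proofs are below) =====
def Claim_equal_fallback_script_py : Prop := ∀ (audio_type : String) (description : String) (duration : Int), Dom_fallback_script_py audio_type description duration → Spec_fallback_script_py audio_type description duration (fallback_script_py audio_type description duration)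

-- ===== LEMMAS AND PROOFS =====

-- the accumulator of split₀.go only collects finished words
theorem pv_go_acc (t : List Char) : ∀ (cur : List Char) (acc : List (List Char)),
    PySem.Chars.split₀.go t cur acc = acc.reverse ++ PySem.Chars.split₀.go t cur [] := by
  induction t with
  | nil => intro cur acc; simp only [PySem.Chars.split₀.go]; split <;> simp
  | cons c rest ih =>
    intro cur acc
    simp only [PySem.Chars.split₀.go]
    by_cases hs : PySem.Chars.isspace c
    · simp only [hs, if_true]
      by_cases hc : cur.isEmpty
      · simp only [hc, if_true]; exact ih [] acc
      · simp only [hc]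
        rw [if_neg (by simp [hc]), ih [] (cur.reverse :: acc), ih [] [cur.reverse]]
        simp
    · rw [if_neg (by simp [hs]), if_neg (by simp [hs])]
      exact ih (c :: cur) acc

-- splitting at an explicit space concatenates the word lists
theorem pv_go_append_space (t : List Char) : ∀ (s cur : List Char) (acc : List (List Char)),
    PySem.Chars.split₀.go (s ++ ' ' :: t) cur acc
      = PySem.Chars.split₀.go s cur acc ++ PySem.Chars.split₀ t := by
  intro s
  induction s with
  | nil =>
    intro cur acc
    simp only [List.nil_append, PySem.Chars.split₀.go]
    rw [if_pos (by decide)]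
    by_cases hc : cur.isEmpty
    · rw [if_pos hc, if_pos hc, pv_go_acc, PySem.Chars.split₀]
    · rw [if_neg hc, if_neg hc, pv_go_acc, PySem.Chars.split₀]
  | cons c rest ih =>
    intro cur acc
    simp only [List.cons_append, PySem.Chars.split₀.go]
    by_cases hs : PySem.Chars.isspace c
    · rw [if_pos hs, if_pos hs]
      by_cases hc : cur.isEmpty
      · rw [if_pos hc, if_pos hc, ih]
      · rw [if_neg hc, if_neg hc, ih]
    · rw [if_neg hs, if_neg hs, ih]

theorem pv_split₀_append_space (s t : List Char) :
    PySem.Chars.split₀ (s ++ ' ' :: t) = PySem.Chars.split₀ s ++ PySem.Chars.split₀ t := by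
  simp only [PySem.Chars.split₀]
  exact pv_go_append_space t s [] []

theorem pv_go_pos (t : List Char) : ∀ (cur : List Char) (acc : List (List Char)), cur ≠ [] →
    1 ≤ (PySem.Chars.split₀.go t cur acc).length := by
  induction t with
  | nil =>
    intro cur acc hc
    simp only [PySem.Chars.split₀.go]
    rw [if_neg (by simpa using hc)]
    simp
  | cons c rest ih =>
    intro cur acc hc
    simp only [PySem.Chars.split₀.go]
    by_cases hs : PySem.Chars.isspace c
    · rw [if_pos hs, if_neg (by simpa using hc), pv_go_acc]
      simp
      omega
    · rw [if_neg hs]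
      exact ih (c :: cur) acc (by simp)

-- everything after the suffix's leading space
def pvSuffixRest (ds : List Char) : List Char :=
  '[' :: ("PAUSE] This gives you time to reflect on ".toList ++ ds ++ " and how it applies to your situation.".toList)

theorem pv_split₀_suffix (ds : List Char) :
    PySem.Chars.split₀ (pvSuffix ds) = PySem.Chars.split₀ (pvSuffixRest ds) :=
  pv_split₀_append_space [] (pvSuffixRest ds)

theorem pv_split₀_cons_pos (c : Char) (t : List Char) (h : PySem.Chars.isspace c = false) :
    1 ≤ (PySem.Chars.split₀ (c :: t)).length := by
  simp only [PySem.Chars.split₀, PySem.Chars.split₀.go, h]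
  exact pv_go_pos t [c] [] (by simp)

-- the suffix contains at least one word, whatever the description is
theorem pv_ws_pos (ds : List Char) : 1 ≤ (PySem.Chars.split₀ (pvSuffix ds)).length := by
  rw [pv_split₀_suffix, pvSuffixRest]
  exact pv_split₀_cons_pos _ _ (by decide)

-- appending one suffix adds exactly the suffix's word count
theorem pv_wc_append_suffix (s ds : List Char) :
    (PySem.Chars.split₀ (s ++ pvSuffix ds)).length
      = (PySem.Chars.split₀ s).length + (PySem.Chars.split₀ (pvSuffix ds)).length := by
  rw [pv_split₀_suffix]
  calc (PySem.Chars.split₀ (s ++ pvSuffix ds)).length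
      = (PySem.Chars.split₀ s ++ PySem.Chars.split₀ (pvSuffixRest ds)).length :=
        congrArg List.length (pv_split₀_append_space s (pvSuffixRest ds))
    _ = _ := List.length_append ..

-- the padding loop appends exactly k copies of the suffix, for the k bracketed below
theorem pv_loop_eq_pad (ds : List Char) (target : Int) :
    ∀ (f : Nat) (s : List Char) (k : Nat),
      (1 ≤ k → ((k : Int) - 1) * ((PySem.Chars.split₀ (pvSuffix ds)).length : Int)
          < target - ((PySem.Chars.split₀ s).length : Int)) →
      (target - ((PySem.Chars.split₀ s).length : Int)
          ≤ (k : Int) * ((PySem.Chars.split₀ (pvSuffix ds)).length : Int)) →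
      k ≤ f →
      pvLoopA (pvSuffix ds) target f s = s ++ (List.replicate k (pvSuffix ds)).flatten := by
  intro f
  induction f with
  | zero =>
    intro s k _ _ hk
    interval_cases k
    simp [pvLoopA]
  | succ f ih =>
    intro s k h1 h2 hkf
    set ws : Int := ((PySem.Chars.split₀ (pvSuffix ds)).length : Int) with hws
    have hws1 : 1 ≤ ws := by rw [hws]; exact_mod_cast pv_ws_pos ds
    by_cases hlt : ((PySem.Chars.split₀ s).length : Int) < target
    · -- the loop runs once more
      have hk1 : 1 ≤ k := by
        by_contra h
        have : k = 0 := by omega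
        subst this
        simp at h2
        omega
      have hwc : ((PySem.Chars.split₀ (s ++ pvSuffix ds)).length : Int)
          = ((PySem.Chars.split₀ s).length : Int) + ws := by
        rw [pv_wc_append_suffix]; push_cast; ring
      have step : pvLoopA (pvSuffix ds) target (f+1) s = pvLoopA (pvSuffix ds) target f (s ++ pvSuffix ds) := by
        simp [pvLoopA, hlt]
      rw [step, ih (s ++ pvSuffix ds) (k-1)]
      · have : k - 1 + 1 = k := by omega
        rw [← this, List.replicate_succ, List.flatten_cons, ← List.append_assoc]
        rw [this]
      · intro hk2
        have := h1 hk1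
        rw [hwc]
        have hcast : ((k - 1 : Nat) : Int) = (k : Int) - 1 := by omega
        rw [hcast] at *
        nlinarith
      · rw [hwc]
        have hcast : ((k - 1 : Nat) : Int) = (k : Int) - 1 := by omega
        rw [hcast]
        have := h1 hk1
        nlinarith
      · omega
    · -- the loop exits at once: k must be 0
      have hk0 : k = 0 := by
        by_contra h
        have hk1 : 1 ≤ k := by omega
        have := h1 hk1
        have hkpos : (0:Int) ≤ (k:Int) - 1 := by
          have : (1:Int) ≤ (k:Int) := by exact_mod_cast hk1
          omega
        nlinarith
      subst hk0
      simp [pvLoopA, hlt]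

-- A's dict lookup with default agrees with B's if/elif chain
theorem pv_base_eq (audio_type : String) (ds ns : List Char) :
    (PySem.Dict.ofList
      [("voiceover", pvVoiceover ds ns), ("podcast", pvPodcast ds), ("audiobook", pvAudiobook ds),
       ("training", pvTraining ds ns), ("meditation", pvMeditation ds ns)]).getD audio_type
      (((PySem.Dict.ofList
      [("voiceover", pvVoiceover ds ns), ("podcast", pvPodcast ds), ("audiobook", pvAudiobook ds),
       ("training", pvTraining ds ns), ("meditation", pvMeditation ds ns)]).get? "voiceover").getD [])
      = pvBaseB audio_type ds ns := by
  have hmk : (PySem.Dict.ofList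
      [("voiceover", pvVoiceover ds ns), ("podcast", pvPodcast ds), ("audiobook", pvAudiobook ds),
       ("training", pvTraining ds ns), ("meditation", pvMeditation ds ns)])
      = PySem.Dict.mk [("voiceover", pvVoiceover ds ns), ("podcast", pvPodcast ds), ("audiobook", pvAudiobook ds),
       ("training", pvTraining ds ns), ("meditation", pvMeditation ds ns)] := rfl
  rw [hmk]
  rw [PySem.Dict.getD_eq_get?_getD]
  simp only [PySem.Dict.get?_mk_cons]
  rw [show ((PySem.Dict.mk [] : PySem.Dict String (List Char)).get? audio_type) = none from rfl]
  unfold pvBaseB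
  by_cases h1 : audio_type = "voiceover"
  · subst h1; rfl
  by_cases h2 : audio_type = "podcast"
  · subst h2; rfl
  by_cases h3 : audio_type = "audiobook"
  · subst h3; rfl
  by_cases h4 : audio_type = "training"
  · subst h4; rfl
  by_cases h5 : audio_type = "meditation"
  · subst h5; rfl
  rw [if_neg h2, if_neg h3, if_neg h4, if_neg h5,
      if_neg (by simp only [beq_iff_eq]; exact fun h => h1 h.symm), if_neg (by simp only [beq_iff_eq]; exact fun h => h2 h.symm), if_neg (by simp only [beq_iff_eq]; exact fun h => h3 h.symm),
      if_neg (by simp only [beq_iff_eq]; exact fun h => h4 h.symm), if_neg (by simp only [beq_iff_eq]; exact fun h => h5 h.symm)]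
  rfl

-- ===== VERDICT (by name: the statement is the Claim_ definition above) =====
theorem fallback_script_py_spec : Claim_equal_fallback_script_py := by
  intro audio_type description duration _
  unfold Spec_fallback_script_py fallback_script_py fallback_script_py_alt
  dsimp only
  rw [pv_base_eq audio_type description.toList (PySem.Int.toChars duration)]
  set ds := description.toList with hds
  set target : Int := duration * 150 with htarget
  set base := pvBaseB audio_type ds (PySem.Int.toChars duration) with hbase
  set wb : Int := ((PySem.Chars.split₀ base).length : Int) with hwb
  set ws : Int := ((PySem.Chars.split₀ (pvSuffix ds)).length : Int) with hws
  have hws1 : 1 ≤ ws := by rw [hws]; exact_mod_cast pv_ws_pos ds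
  have hwb0 : 0 ≤ wb := by rw [hwb]; positivity
  set q : Int := -(PySem.Int.floordiv (wb - target) ws) with hq
  have hch : (q - 1) * ws < target - wb ∧ target - wb ≤ q * ws := by
    apply (PySem.Int.neg_floordiv_neg_eq_iff_of_pos (a := target - wb) (b := ws) (by omega)).mp
    rw [hq]; ring_nf
  have hmax : (((max 0 q).toNat : Int)) = max 0 q := Int.toNat_of_nonneg (le_max_left 0 q)
  congr 1
  congr 1
  rw [pv_loop_eq_pad ds target target.toNat base (max 0 q).toNat]
  · intro hk1
    have hq1 : 1 ≤ q := by
      by_contra h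
      push Not at h
      have : max 0 q = 0 := by omega
      omega
    rw [hmax]
    have : max 0 q = q := by omega
    rw [this]
    exact hch.1
  · rw [hmax]
    by_cases hq1 : 1 ≤ q
    · have : max 0 q = q := by omega
      rw [this]; exact hch.2
    · push Not at hq1
      have hqle : q * ws ≤ 0 := by nlinarith
      have : max 0 q = 0 := by omega
      rw [this]; simp; omega
  · -- fuel bound: the loop runs at most target times
    by_cases hq1 : 1 ≤ q
    · have hle : q ≤ target := by nlinarith [hch.1]
      have : max 0 q = q := by omega
      rw [this]
      omega
    · have : max 0 q = 0 := by omega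
      rw [this]
      simp
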